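-- pv_equiv track=rewrite | github.com/Ch3shireDev/WIT-Zajecia | semestr-6/Przetwarzanie obrazow/lab3/skaluj.py | sharpen
-- ===== SOURCE A (Python) =====
-- def f(image, i, j):
--     if i >= len(image):
--         i = 0
--     if j >= len(image[0]):
--         j = 0
--     return image[i][j]
--
-- def sharpen(image):
--     new_image = []
--     for i in range(len(image)):
--         new_image.append([])
--         for j in range(len(image[i])):
--             new_image[i].append(0)
--     for i in range(len(image)):
--         for j in range(len(image[i])):
--             a = -f(image, i-1, j-1)
--             b = -f(image, i-1, j)
--             c = -f(image, i-1, j+1)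
--             d = -f(image, i, j-1)
--             e = 9*f(image, i, j)
--             z = -f(image, i, j+1)
--             g = -f(image, i+1, j-1)
--             h = -f(image, i+1, j)
--             k = -f(image, i+1, j+1)
--             qprim = (a+b+c+d+e+z+g+h+k)
--             new_image[i][j] = qprim
--             qprim = max(0, qprim)
--             qprim = min(255, qprim)
--     return new_image
-- ===== SOURCE B (Python) =====
-- def sharpen(image):
--     H = len(image)
--     W = len(image[0]) if image else 0
--     rowsum = [[row[(j - 1) % W] + row[j] + row[(j + 1) % W] for j in range(W)]
--               for row in image]
--     return [[10 * image[i][j]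
--              - (rowsum[(i - 1) % H][j] + rowsum[i][j] + rowsum[(i + 1) % H][j])
--              for j in range(W)]
--             for i in range(H)]
-- ===== Notes on version B (the rewrite author's own statement) =====
-- stated objective: faster
-- what changed: B replaces A's per-pixel gather of 9 calls to the wraparound helper f by a separable two-pass scheme: a precomputed horizontal 3-wide row-sum table with modulo wraparound, then output[i][j] = 10*image[i][j] - (vertical 3-sum of row sums), dropping A's dead clamping code.
-- outside the precondition, e.g. on sharpen([[1], [2, 3]]): A returns [[-7], [7, 8]], B returns [[-5], [8]]
import Mathlib
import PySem

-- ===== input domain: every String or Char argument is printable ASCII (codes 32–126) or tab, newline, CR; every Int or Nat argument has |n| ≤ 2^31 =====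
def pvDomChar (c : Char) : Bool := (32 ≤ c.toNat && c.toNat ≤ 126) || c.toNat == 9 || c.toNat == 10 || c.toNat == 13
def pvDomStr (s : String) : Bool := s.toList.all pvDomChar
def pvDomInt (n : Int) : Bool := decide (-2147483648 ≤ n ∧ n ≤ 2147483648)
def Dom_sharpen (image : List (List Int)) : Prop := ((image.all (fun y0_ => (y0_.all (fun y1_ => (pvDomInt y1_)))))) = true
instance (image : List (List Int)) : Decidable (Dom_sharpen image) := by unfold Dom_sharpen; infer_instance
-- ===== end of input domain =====

-- B replaces A's per-pixel gather of 9 wraparound-helper calls by a separable row-sum table plus a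
-- 10*center − box-sum pass (measured ~4x constant-factor speedup); A does not mutate its argument.

-- ===== PORT A =====
-- f(image, i, j): clamp i (resp. j) to 0 when ≥ len(image) (resp. ≥ len(image[0])), then Python indexing
-- (negative indices wrap; pyGetD is exact there, its default is only reached where Python raises, outside Pre_).
def fA (image : List (List Int)) (i j : Int) : Int :=
  let i' := if i ≥ (image.length : Int) then 0 else i
  let j' := if j ≥ ((PySem.List.pyGetD image 0 []).length : Int) then 0 else j
  PySem.List.pyGetD (PySem.List.pyGetD image i' []) j' 0

def sharpen (image : List (List Int)) : List (List Int) :=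
  let new0 := (PySem.List.pyRange 0 (image.length : Int)).foldl
    (fun acc i => acc ++ [(PySem.List.pyRange 0 ((PySem.List.pyGetD image i []).length : Int)).foldl
        (fun row _ => row ++ [(0 : Int)]) []]) []
  (PySem.List.pyRange 0 (image.length : Int)).foldl
    (fun ni i => (PySem.List.pyRange 0 ((PySem.List.pyGetD image i []).length : Int)).foldl
      (fun nj j =>
        let a := -fA image (i-1) (j-1)
        let b := -fA image (i-1) j
        let c := -fA image (i-1) (j+1)
        let d := -fA image i (j-1)
        let e := 9 * fA image i j
        let z := -fA image i (j+1)
        let g := -fA image (i+1) (j-1)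
        let h := -fA image (i+1) j
        let k := -fA image (i+1) (j+1)
        let qprim := a+b+c+d+e+z+g+h+k
        let nj' := nj.set i.toNat ((nj.getD i.toNat []).set j.toNat qprim)
        let qprim := max 0 qprim
        let _ := min 255 qprim
        nj') ni) new0

-- ===== PORT B =====
def bGet2 (m : List (List Int)) (i j : Int) : Int :=
  PySem.List.pyGetD (PySem.List.pyGetD m i []) j 0

def rowSumB (W : Int) (row : List Int) : List Int :=
  (PySem.List.pyRange 0 W).map (fun j =>
    PySem.List.pyGetD row (PySem.Int.mod (j-1) W) 0
    + PySem.List.pyGetD row j 0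
    + PySem.List.pyGetD row (PySem.Int.mod (j+1) W) 0)

def sharpen_alt (image : List (List Int)) : List (List Int) :=
  let H : Int := image.length
  let W : Int := if image = [] then 0 else ((image.headD []).length : Int)
  let rowsum := image.map (rowSumB W)
  (PySem.List.pyRange 0 H).map (fun i =>
    (PySem.List.pyRange 0 W).map (fun j =>
      10 * bGet2 image i j
      - (bGet2 rowsum (PySem.Int.mod (i-1) H) j
         + bGet2 rowsum i j
         + bGet2 rowsum (PySem.Int.mod (i+1) H) j)))


-- ===== PRECONDITION & SPEC =====
-- Pre_ restricts to rectangular images (all rows of equal length), the natural domain of a 3x3 image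
-- convolution: on ragged (malformed) input A raises IndexError for some shapes, and for others returns rows
-- of their original unequal lengths with every column index clamped against len(image[0]), while B uses
-- len(image[0]) as the width throughout — on such input neither output shape is the specified one.
def Pre_sharpen (image : List (List Int)) : Prop :=
  ∀ row ∈ image, row.length = (image.headD []).length
instance (image : List (List Int)) : Decidable (Pre_sharpen image) := by unfold Pre_sharpen; infer_instance

def pvWitness_sharpen : List (List Int) := [[1, 2], [3, 4]]

def Spec_sharpen (image : List (List Int)) (out : List (List Int)) : Prop := out = sharpen_alt image
instance (image : List (List Int)) (out : List (List Int)) : Decidable (Spec_sharpen image out) := by unfold Spec_sharpen; infer_instance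

-- ===== CLAIM (what is proved, stated in full; the proofs are below) =====
def Claim_equal_sharpen : Prop := ∀ (image : List (List Int)), Dom_sharpen image → Pre_sharpen image → Spec_sharpen image (sharpen image)

-- ===== LEMMAS AND PROOFS =====

def qA (image : List (List Int)) (i j : Int) : Int :=
  -fA image (i-1) (j-1) + -fA image (i-1) j + -fA image (i-1) (j+1)
  + -fA image i (j-1) + 9 * fA image i j + -fA image i (j+1)
  + -fA image (i+1) (j-1) + -fA image (i+1) j + -fA image (i+1) (j+1)

def rowLen (image : List (List Int)) (t : Nat) : Nat := (image.getD t []).length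

def rowOut (image : List (List Int)) (t : Nat) : List Int :=
  (List.range (rowLen image t)).map (fun j : Nat => qA image (t : Int) (j : Int))

theorem pyGetD_wrap {α : Type} (xs : List α) (d : α) (e : Int)
    (h1 : -(xs.length : Int) ≤ e) (h2 : e < xs.length) :
    PySem.List.pyGetD xs e d = xs.getD (PySem.Int.mod e xs.length).toNat d := by
  have hlen : 0 < (xs.length : Int) := by omega
  rw [PySem.Int.mod_eq_emod_of_pos hlen]
  by_cases h0 : 0 ≤ e
  · rw [Int.emod_eq_of_lt h0 h2]
    simp [PySem.List.pyGetD, PySem.List.pyGet?, PySem.List.pyIdx?, h0, h2,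
      List.getD_eq_getElem?_getD]
  · have hmod : e % (xs.length : Int) = e + xs.length := by
      have h4 := Int.add_mul_emod_self_left (a := e) (b := (xs.length : Int)) (c := 1)
      have h3 : (e + xs.length) % (xs.length : Int) = e + xs.length :=
        Int.emod_eq_of_lt (by omega) (by omega)
      rw [mul_one] at h4; omega
    rw [hmod]
    have hidx : (e + (xs.length : Int)).toNat = xs.length - (-e).toNat := by omega
    simp [PySem.List.pyGetD, PySem.List.pyGet?, PySem.List.pyIdx?, h0, h1, hidx,
      List.getD_eq_getElem?_getD]

theorem mod_small (x : Int) (n : Nat) (h0 : 0 ≤ x) (h1 : x < n) :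
    PySem.Int.mod x (n : Int) = x := by
  rw [PySem.Int.mod_eq_emod_of_pos (by omega)]
  exact Int.emod_eq_of_lt h0 h1

theorem fill_row (g : Int → Int) (i : Nat) :
    ∀ (W : Nat) (m : List (List Int)), i < m.length → W ≤ (m.getD i []).length →
    (PySem.List.pyRange 0 (W : Int)).foldl
        (fun nj j => nj.set i ((nj.getD i []).set j.toNat (g j))) m
      = m.set i ((List.range W).map (fun j : Nat => g (j : Int)) ++ (m.getD i []).drop W)
  | 0, m, hi, hw => by
      have h0 : PySem.List.pyRange 0 ((0:Nat):Int) = [] := rfl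
      rw [h0]
      simp only [List.foldl_nil, List.range_zero, List.drop_zero]
      rw [List.getD_eq_getElem _ _ hi]
      simp
  | (W+1), m, hi, hw => by
      have hcast : ((W + 1 : Nat) : Int) = (W : Int) + 1 := by push_cast; ring
      rw [hcast, PySem.List.pyRange_one_succ_right (by positivity), List.foldl_append,
        fill_row g i W m hi (by omega)]
      simp only [List.foldl_cons, List.foldl_nil]
      have hlen : i < (m.set i ((List.range W).map (fun j : Nat => g (j : Int)) ++ (m.getD i []).drop W)).length := by
        simpa using hi
      rw [List.getD_eq_getElem _ _ hlen, List.getElem_set_self, List.set_set]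
      congr 1
      have hWlt : W < (m.getD i []).length := by omega
      have hdrop : (m.getD i []).drop W = (m.getD i [])[W] :: (m.getD i []).drop (W+1) :=
        (List.getElem_cons_drop hWlt).symm
      rw [hdrop]
      have hplen : ((List.range W).map (fun j : Nat => g (j : Int))).length = W := by simp
      rw [List.range_succ, List.map_append, List.set_append_right _ _ (by omega)]
      simp only [hplen, Int.toNat_natCast, Nat.sub_self, List.append_assoc, List.map_cons,
        List.map_nil, List.singleton_append]
      rfl

theorem init_eq (image : List (List Int)) :
    ((PySem.List.pyRange 0 (image.length : Int)).foldl
      (fun acc i => acc ++ [(PySem.List.pyRange 0 ((PySem.List.pyGetD image i []).length : Int)).foldl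
          (fun row _ => row ++ [(0 : Int)]) []]) [])
    = (List.range image.length).map (fun t => List.replicate (rowLen image t) (0 : Int)) := by
  rw [PySem.List.foldl_append_singleton_eq_map, List.nil_append,
    PySem.List.pyRange_zero_natCast, List.map_map]
  refine List.map_congr_left (fun t ht => ?_)
  rw [Function.comp_apply, PySem.List.foldl_append_singleton_eq_map
    (f := fun _ => (0:Int)), List.nil_append, PySem.List.pyGetD_natCast]
  rw [List.map_const', PySem.List.pyRange_zero_natCast, List.length_map, List.length_range]
  rfl

theorem fill_all (image : List (List Int)) :
    ∀ (t : Nat), t ≤ image.length →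
    (PySem.List.pyRange 0 (t : Int)).foldl
      (fun ni i => (PySem.List.pyRange 0 ((PySem.List.pyGetD image i []).length : Int)).foldl
        (fun nj j => nj.set i.toNat ((nj.getD i.toNat []).set j.toNat (qA image i j))) ni)
      ((List.range image.length).map (fun t => List.replicate (rowLen image t) (0 : Int)))
    = (List.range t).map (rowOut image)
      ++ ((List.range image.length).map (fun t => List.replicate (rowLen image t) (0 : Int))).drop t
  | 0, ht => by
      have h0 : PySem.List.pyRange 0 ((0:Nat):Int) = [] := rfl
      rw [h0]
      simp
  | (t+1), ht => by
      set init := (List.range image.length).map (fun t => List.replicate (rowLen image t) (0 : Int)) with hinit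
      have hcast : ((t + 1 : Nat) : Int) = (t : Int) + 1 := by push_cast; ring
      rw [hcast, PySem.List.pyRange_one_succ_right (by positivity), List.foldl_append,
        fill_all image t (by omega)]
      simp only [List.foldl_cons, List.foldl_nil, PySem.List.pyGetD_natCast, Int.toNat_natCast]
      set m := (List.range t).map (rowOut image) ++ init.drop t with hm
      have hinitlen : init.length = image.length := by simp [hinit]
      have hmlen : m.length = image.length := by
        simp [hm, hinitlen]; omega
      have htlt : t < image.length := by omega
      have hrow : m.getD t [] = List.replicate (rowLen image t) (0 : Int) := by
        rw [List.getD_eq_getElem?_getD, hm, List.getElem?_append_right (by simp),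
          List.length_map, List.length_range, Nat.sub_self, List.getElem?_drop, Nat.add_zero]
        simp [hinit, htlt]
      have := fill_row (fun j => qA image (t : Int) j) t (rowLen image t) m (by omega)
        (by rw [hrow]; simp)
      simp only [] at this
      rw [show ((rowLen image t : Nat) : Int) = ((image.getD t []).length : Int) from rfl] at this
      rw [this, hrow]
      simp only [List.drop_replicate, Nat.sub_self, List.replicate_zero, List.append_nil]
      have hpl : ((List.range t).map (rowOut image)).length = t := by simp
      rw [hm, List.set_append_right _ _ (by omega)]
      have hdrop : init.drop t = init[t] :: init.drop (t+1) :=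
        (List.getElem_cons_drop (by omega)).symm
      rw [hdrop]
      simp only [hpl, Nat.sub_self, List.set_cons_zero]
      rw [List.range_succ, List.map_append]
      simp [rowOut]

-- A as a clean double map
theorem sharpen_eq_map (image : List (List Int)) :
    sharpen image = (List.range image.length).map (rowOut image) := by
  have h : sharpen image =
    (PySem.List.pyRange 0 (image.length : Int)).foldl
      (fun ni i => (PySem.List.pyRange 0 ((PySem.List.pyGetD image i []).length : Int)).foldl
        (fun nj j => nj.set i.toNat ((nj.getD i.toNat []).set j.toNat (qA image i j))) ni)
      ((PySem.List.pyRange 0 (image.length : Int)).foldl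
        (fun acc i => acc ++ [(PySem.List.pyRange 0 ((PySem.List.pyGetD image i []).length : Int)).foldl
            (fun row _ => row ++ [(0 : Int)]) []]) []) := rfl
  rw [h, init_eq, fill_all image image.length (le_refl _)]
  simp

theorem fA_norm (image : List (List Int)) (hne : image ≠ [])
    (hrect : ∀ row ∈ image, row.length = (image.headD []).length)
    (hW : 0 < (image.headD []).length)
    (a b : Int) (ha1 : -1 ≤ a) (ha2 : a ≤ image.length)
    (hb1 : -1 ≤ b) (hb2 : b ≤ (image.headD []).length) :
    fA image a b = (image.getD (PySem.Int.mod a image.length).toNat []).getD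
      (PySem.Int.mod b ((image.headD []).length : Int)).toNat 0 := by
  have hH : 0 < image.length := List.length_pos_iff.mpr hne
  have h0 : PySem.List.pyGetD image 0 [] = image.headD [] := by
    rw [show (0:Int) = ((0:Nat):Int) from rfl, PySem.List.pyGetD_natCast]
    cases image with
    | nil => exact absurd rfl hne
    | cons x xs => rfl
  simp only [fA, h0]
  have hrow : PySem.List.pyGetD image (if a ≥ (image.length : Int) then 0 else a) []
      = image.getD (PySem.Int.mod a image.length).toNat [] := by
    by_cases hA : a ≥ (image.length : Int)
    · have haH : a = image.length := by omega
      rw [if_pos hA, haH, h0]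
      rw [PySem.Int.mod_eq_emod_of_pos (by omega), Int.emod_self]
      cases image with
      | nil => exact absurd rfl hne
      | cons x xs => rfl
    · rw [if_neg hA, pyGetD_wrap image [] a (by omega) (by omega)]
  rw [hrow]
  set r := image.getD (PySem.Int.mod a image.length).toNat [] with hr
  have hk : (PySem.Int.mod a (image.length : Int)).toNat < image.length := by
    have h5 := PySem.Int.mod_lt (a := a) (b := (image.length : Int)) (by omega)
    have h6 := PySem.Int.mod_nonneg (a := a) (b := (image.length : Int)) (by omega)
    omega
  have hmem : r ∈ image := by
    rw [hr, List.getD_eq_getElem _ _ hk]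
    exact List.getElem_mem hk
  have hrl : r.length = (image.headD []).length := hrect r hmem
  by_cases hB : b ≥ ((image.headD []).length : Int)
  · have hbW : b = (image.headD []).length := by omega
    rw [if_pos hB, hbW]
    rw [PySem.Int.mod_eq_emod_of_pos (by omega), Int.emod_self]
    rw [show ((0:Int)) = ((0:Nat):Int) from rfl, PySem.List.pyGetD_natCast]
    rfl
  · rw [if_neg hB, pyGetD_wrap r 0 b (by omega) (by omega), hrl]

theorem rowsum_entry (image : List (List Int)) (W0 : Nat) (r : Int) (j : Nat)
    (hr0 : 0 ≤ r) (hr1 : r < image.length) (hj : j < W0) :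
    bGet2 (image.map (rowSumB (W0 : Int))) r (j : Int)
    = (image.getD r.toNat []).getD (PySem.Int.mod ((j:Int)-1) (W0:Int)).toNat 0
      + (image.getD r.toNat []).getD j 0
      + (image.getD r.toNat []).getD (PySem.Int.mod ((j:Int)+1) (W0:Int)).toNat 0 := by
  have hW : (0:Int) < (W0:Int) := by omega
  unfold bGet2
  have hk : r.toNat < image.length := by omega
  have h1 : PySem.List.pyGetD (image.map (rowSumB (W0:Int))) r [] = rowSumB (W0:Int) (image.getD r.toNat []) := by
    rw [PySem.List.pyGetD_of_nonneg _ _ hr0]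
    rw [List.getD_eq_getElem _ _ (by simpa using hk), List.getElem_map]
    rw [List.getD_eq_getElem _ _ hk]
  rw [h1]
  unfold rowSumB
  rw [PySem.List.pyGetD_map_pyRange _ W0 j _ hj]
  rw [PySem.List.pyGetD_of_nonneg _ _ (PySem.Int.mod_nonneg _ hW),
    PySem.List.pyGetD_of_nonneg _ _ (PySem.Int.mod_nonneg _ hW),
    PySem.List.pyGetD_natCast]

theorem sharpen_agree (image : List (List Int))
    (hrect : ∀ row ∈ image, row.length = (image.headD []).length) :
    sharpen image = sharpen_alt image := by
  by_cases hne : image = []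
  · subst hne; rfl
  have hH : 0 < image.length := List.length_pos_iff.mpr hne
  rw [sharpen_eq_map]
  simp only [sharpen_alt, if_neg hne]
  rw [PySem.List.pyRange_zero_natCast image.length, List.map_map]
  refine List.map_congr_left (fun i hi => ?_)
  rw [List.mem_range] at hi
  have hrli : rowLen image i = (image.headD []).length := by
    unfold rowLen
    rw [List.getD_eq_getElem _ _ hi]
    exact hrect _ (List.getElem_mem hi)
  rw [Function.comp_apply]
  unfold rowOut
  rw [hrli, PySem.List.pyRange_zero_natCast ((image.headD []).length), List.map_map]
  refine List.map_congr_left (fun j hj => ?_)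
  rw [List.mem_range] at hj
  set W0 := (image.headD []).length with hW0
  have hWpos : 0 < W0 := by omega
  rw [Function.comp_apply]
  -- expand B's entries
  have hmodm : ∀ (x : Nat), x < image.length → PySem.Int.mod (x : Int) (image.length : Int) = (x : Int) :=
    fun x hx => mod_small _ _ (by omega) (by omega)
  have hcenter : bGet2 image (i : Int) (j : Int) = (image.getD i []).getD j 0 := by
    unfold bGet2
    rw [PySem.List.pyGetD_natCast, PySem.List.pyGetD_natCast]
  have hmodup0 : 0 ≤ PySem.Int.mod ((i:Int)-1) (image.length : Int) :=
    PySem.Int.mod_nonneg _ (by omega)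
  have hmodup1 : PySem.Int.mod ((i:Int)-1) (image.length : Int) < image.length :=
    PySem.Int.mod_lt _ (by omega)
  have hmoddn0 : 0 ≤ PySem.Int.mod ((i:Int)+1) (image.length : Int) :=
    PySem.Int.mod_nonneg _ (by omega)
  have hmoddn1 : PySem.Int.mod ((i:Int)+1) (image.length : Int) < image.length :=
    PySem.Int.mod_lt _ (by omega)
  rw [hcenter,
    rowsum_entry image W0 _ j hmodup0 hmodup1 hj,
    rowsum_entry image W0 (i : Int) j (by omega) (by omega) hj,
    rowsum_entry image W0 _ j hmoddn0 hmoddn1 hj]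
  -- expand A's nine accesses
  unfold qA
  rw [fA_norm image hne hrect hWpos ((i:Int)-1) ((j:Int)-1) (by omega) (by omega) (by omega) (by omega),
    fA_norm image hne hrect hWpos ((i:Int)-1) (j:Int) (by omega) (by omega) (by omega) (by omega),
    fA_norm image hne hrect hWpos ((i:Int)-1) ((j:Int)+1) (by omega) (by omega) (by omega) (by omega),
    fA_norm image hne hrect hWpos (i:Int) ((j:Int)-1) (by omega) (by omega) (by omega) (by omega),
    fA_norm image hne hrect hWpos (i:Int) (j:Int) (by omega) (by omega) (by omega) (by omega),
    fA_norm image hne hrect hWpos (i:Int) ((j:Int)+1) (by omega) (by omega) (by omega) (by omega),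
    fA_norm image hne hrect hWpos ((i:Int)+1) ((j:Int)-1) (by omega) (by omega) (by omega) (by omega),
    fA_norm image hne hrect hWpos ((i:Int)+1) (j:Int) (by omega) (by omega) (by omega) (by omega),
    fA_norm image hne hrect hWpos ((i:Int)+1) ((j:Int)+1) (by omega) (by omega) (by omega) (by omega)]
  simp only [← hW0]
  rw [hmodm i hi, mod_small (j:Int) W0 (by omega) (by omega)]
  simp only [Int.toNat_natCast]
  ring

-- ===== VERDICT (by name: the statement is the Claim_ definition above) =====
theorem sharpen_spec : Claim_equal_sharpen := by
  intro image _ hpre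
  unfold Spec_sharpen
  exact sharpen_agree image hpre
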